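/- PORTED by tools/port_fixed.py from Prog/Jsmn/D/ParsePrim.lean to THE FIXED IMAGE fixed/jsmn_d.bin (same bytes at the same addresses; binFDc). Do not edit: edit the original and port again. -/
/-
  jsmn_d.bin, `jsmn_parse`: `default:` of the switch (1002C3H – 10030CH, 18 instructions + the `return r` stub 100550H, 2).
      primitive_spec   1002C3H → 100462H | 100529H   r = jsmn_parse_primitive(parser, js, len, tokens, num_tokens) (by its contract `PrimSpec`);
                                                     r < 0 → return r; count++; toksuper != -1 && tokens != NULL → tokens[toksuper].size++
  Model: `Jsmn.primitiveCase`. The same text as the string case (Prog/Jsmn/D/ParseStr.lean) at other addresses.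
-/
import Prog.Jsmn.Fixed.Specs
import Prog.Jsmn.Fixed.CodeFD
import Prog.Jsmn.Fixed.D.ParseCallLemmas
namespace X86
namespace J6
namespace FD
open X86.User (CodeAt RegsKept Span FlagsOK Layout toNat_add_ofNat toNat_ofNat_lt' add_ofNat_add)
open Jsmn JsmnFDBytes

set_option maxRecDepth 100000
set_option maxHeartbeats 4000000
set_option linter.unusedSimpArgs false
set_option linter.unusedVariables false

/-- The characters the switch sends to `default:` (every unquoted value is a primitive). -/
def IsPrimCh (ch : UInt8) : Prop :=
  ch ≠ 0x3a ∧ ch ≠ 0x22 ∧ ch ≠ 0x7b ∧ ch ≠ 0x5b ∧ ch ≠ 0x7d ∧ ch ≠ 0x5d ∧ ch ≠ 0x2c ∧ ch ≠ 0x09 ∧ ch ≠ 0x0d ∧ ch ≠ 0x0a ∧ ch ≠ 0x20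

/-- The switch sends every other character to `primitiveCase`. -/
theorem body_prim {js : List UInt8} {fuel nt : Nat} {s : St} {ch : UInt8} (hok : IsPrimCh ch) :
    body Config.default js fuel nt s ch = primitiveCase Config.default js fuel nt s := by
  obtain ⟨h1, h2, h3, h4, h5, h6, h7, h8, h9, h10, h11⟩ := hok
  unfold body
  simp [h1, h2, h3, h4, h5, h6, h7, h8, h9, h10, h11, Config.default]

/-- … when the model's parsePrimitive runs out of fuel. -/
theorem body_prim_none {js : List UInt8} {fuel nt : Nat} {s : St} {ch : UInt8} (hok : IsPrimCh ch)
    (h : parsePrimitive Config.default js fuel s.p s.toks nt = none) : body Config.default js fuel nt s ch = none := by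
  rw [body_prim hok]
  unfold primitiveCase
  simp [h]

/-- … return a negative `r`, else count++ and `bumpSuper`. -/
theorem body_prim_some {js : List UInt8} {fuel nt : Nat} {s : St} {ch : UInt8} {r : Int} {p : Parser} {toks : Option Tokens} (hok : IsPrimCh ch)
    (h : parsePrimitive Config.default js fuel s.p s.toks nt = some (r, p, toks)) :
    body Config.default js fuel nt s ch =
      if r < 0 then some (.ret r ⟨p, toks, s.count⟩) else some (.next ⟨p, bumpSuper p toks, i32 (s.count + 1)⟩) := by
  rw [body_prim hok]
  unfold primitiveCase
  simp [h]

variable {n : User.Layout}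

/-- **`default:` of jsmn_parse's switch does what `Jsmn.body` says.** -/
theorem primitive_spec (sf : SafeFacts binFDc.cfg) (hprim : PrimSpec binFDc n) : PrimitiveSpec n := by
  intro c v0 v s ch fuel hok0 hat hne
  have hok : IsPrimCh ch := hok0
  clear hok0
  cases hps : parsePrimitive Config.default c.js fuel s.p s.toks c.numTokens with
  | none => exact absurd (body_prim_none hok hps) hne
  | some res =>
  obtain ⟨r, p1, toks1⟩ := res
  have hbody := body_prim_some hok hps
  rw [hbody]
  clear hne hok
  have hfr := hat.frame
  have hco := hfr.core
  have hen := hco.entry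
  have hp := hen.pre
  have hinv := hfr.inv
  have himg := A2.core_img hco
  have htext := A2.core_text hco
  have hcode := JsmnFD.tjfd_jsmn_parse_core_code himg
  have hfetch := hp.call.fetch
  have hpa := hco.parser
  have hta := hco.toksArg
  have hnum := hinv.numR
  obtain ⟨hinv1, hsup1, hres1, hnull1⟩ := sf.prim c.js fuel s.p s.toks c.numTokens r p1 toks1 hinv hps
  have hW := hp.toksW
  v3_open hat.rip hco.rsp hco.rbp hco.r12 hco.r13 hco.r14 hco.ntok hfr.r15 hp.call hp.env hW
  clear hp_call_rip
  unfold PCtx.tlen at *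
  j6f_bin
  v3_walk hcode hfetch [Word.low32_ofNat_of_lt hnum] until [0x100462, 0x100529]
  have htbeq : toksBytes Config.default c.numTokens s.toks = toksBytes Config.default c.numTokens c.toks0 := A2.toksBytes_congr hco.null
  refine Reach.trans (hprim _ 0x1002d9 c.pa c.jsA c.tb c.js c.numTokens s.p s.toks fuel r p1 toks1
    ⟨by show CallPre n 0x100000 image_bytes 0x100086 24 _ _; v3_callpre himg hp.call, by v3_regnorm, by v3_regnorm, by v3_regnorm, by v3_regnorm, hnum, hp.jslt,
      by v3_frame htext, by v3_frame hpa, A2.toksArg_frame hta (by v3_memnorm; v3_eqon) (by v3_omega),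
      by show Env binFDc n _ 24 c.pa c.jsA c.js.length c.tb (toksBytes Config.default c.numTokens s.toks)
         rw [htbeq]; exact A2.env_callee hp.env (by v3_regnorm) (by v3_omega) (Nat.le_refl _)⟩ (by v3_regnorm) hps) ?_
  intro v1 hpost
  v3_open hpost
  have hk := hpost.ret.kept
  v3_viewnorm at hpost_ret_rsp hpost_ret_same
  j6f_bin
  unfold dataWins at hpost_ret_same
  have hsp64 : (v0.reg .rsp - 64).toNat = (v0.reg .rsp).toNat - 64 := by v3_omega
  have hsp88 : 88 ≤ (v0.reg .rsp).toNat := by v3_omega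
  rw [hsp64] at hpost_ret_same
  have hcode1 : CodeAt v1.mem 0x10027a jsmn_parse_core_bytes := by v3_frame hcodeW
  clear hcodeW
  have hrax := hpost.rax
  unfold RetInt at hrax
  have hpa1 := hpost.parser
  obtain ⟨hsupraw, hsupr1, hsupr2⟩ := hpost_parser_toksuper
  -- the frame after the call, whatever is done to the token array afterwards
  have hcore : ∀ (v' : User.State) (toks' : Option Tokens), v'.reg .rsp = v1.reg .rsp → v'.reg .rbp = v1.reg .rbp → v'.reg .r14 = v1.reg .r14 →
      v'.reg .r13 = v1.reg .r13 → v'.reg .r12 = v1.reg .r12 →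
      SameOutside v1.mem v'.mem [(c.tb.toNat, c.tb.toNat + toksBytes Config.default c.numTokens s.toks)] →
      ParserAt v'.mem c.pa p1 → ToksArg Config.default v'.mem c.tb c.numTokens toks' → (toks' = none ↔ toks1 = none) →
      FrameCore c n v0 v' p1 toks' := by
    intro v' toks' e1 e2 e3 e4 e5 hs hp' ht' hn'
    refine A2.core_step hco (by rw [e1, hpost_ret_rsp, hco_rsp]) (by rw [e2, hk.get .rbp rfl]; v3_regnorm) (by rw [e3, hk.get .r14 rfl]; v3_regnorm)
      (by rw [e4, hk.get .r13 rfl]; v3_regnorm) (by rw [e5, hk.get .r12 rfl]; v3_regnorm) ?_ hp' ht' (hn'.trans hnull1)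
    unfold dataWins PCtx.tlen
    rw [← htbeq]
    have h1 : SameOutside v.mem v1.mem [((v0.reg .rsp).toNat - 88, (v0.reg .rsp).toNat - 56), (c.pa.toNat, c.pa.toNat + 12),
        (c.tb.toNat, c.tb.toNat + toksBytes Config.default c.numTokens s.toks)] := by v3_same
    refine h1.trans (hs.mono ?_)
    intro a ha
    simp only [outside_cons, outside_nil, and_true] at ha ⊢
    omega
  have hstk : SameOutside v1.mem v1.mem [(c.tb.toNat, c.tb.toNat + toksBytes Config.default c.numTokens s.toks)] := SameOutside.refl _ _
  by_cases hneg : r < 0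
  · -- an error code: return it
    rw [if_pos hneg]
    obtain ⟨m, hm, hm1, hm2⟩ : ∃ m : Nat, u32 r = m ∧ 2147483648 ≤ m ∧ m < 4294967296 := by
      refine ⟨u32 r, rfl, ?_, u32_lt r⟩
      rcases hres1 with h | h | h | h <;> subst h
      · omega
      all_goals decide
    rw [hm] at hrax
    v3_walk hcode1 hfetch [] until [0x100462, 0x100529]
    refine Reach.done ⟨by simp, hcore _ toks1 (by v3_regnorm) (by v3_regnorm) (by v3_regnorm) (by v3_regnorm) (by v3_regnorm) (by v3_memnorm; exact hstk)
      (by v3_memnorm; exact hpa1) (by v3_memnorm; exact hpost_toks) Iff.rfl, ?_⟩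
    v3_regnorm
    rw [← hm]
    apply UInt64.toNat_inj.mp
    have := u32_lt r
    v3_omega
  · -- r = 0: count++, tokens[toksuper].size++
    have hr0 : r = 0 := by
      rcases hres1 with h | h | h | h <;> subst h
      · rfl
      all_goals exact absurd (by decide) hneg
    subst hr0
    rw [if_neg hneg]
    rw [if_neg hneg] at hbody
    have hu0 : u32 0 = 0 := by decide
    rw [hu0] at hrax
    by_cases hm1 : p1.toksuper = -1
    · have hsupv : v1.mem.readLE (c.pa + 8) 4 = 4294967295 := by rw [hsupraw, hm1]; rfl
      clear hsupraw
      v3_walk hcode1 hfetch [show ((233 : Nat) == 235) = false by decide, show ((233 : UInt8) == 235) = false by decide,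
        show ((233 : UInt64) == 235) = false by decide] until [0x100462, 0x100529]
      have hbs := A2.bumpSuper_m1 (toks := toks1) hm1
      rw [hbs] at hbody ⊢
      exact Reach.done ⟨by simp, A2.frame_next (fuel := fuel) sf hfr hbody (hcore _ toks1 (by v3_regnorm) (by v3_regnorm) (by v3_regnorm) (by v3_regnorm)
        (by v3_regnorm) (by v3_memnorm; exact hstk) (by v3_memnorm; exact hpa1) (by v3_memnorm; exact hpost_toks) Iff.rfl)
        (by v3_regnorm; exact A2.r15_inc _)⟩
    · cases toks1 with
      | none =>
        -- counting mode: no token array to update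
        have htb0 : c.tb = 0 := hpost_toks
        obtain ⟨m, hsupv, hmne, hmlt⟩ : ∃ m : Nat, v1.mem.readLE (c.pa + 8) 4 = m ∧ m ≠ 4294967295 ∧ m < 4294967296 :=
          ⟨u32 p1.toksuper, hsupraw, by unfold u32; omega, u32_lt _⟩
        clear hsupraw
        v3_walk hcode1 hfetch [show ((233 : Nat) == 235) = false by decide, show ((233 : UInt8) == 235) = false by decide,
          show ((233 : UInt64) == 235) = false by decide] until [0x100462, 0x100529]
        exact Reach.done ⟨by simp, A2.frame_next (fuel := fuel) sf hfr hbody (hcore _ none (by v3_regnorm) (by v3_regnorm) (by v3_regnorm) (by v3_regnorm)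
          (by v3_regnorm) (by v3_memnorm; exact hstk) (by v3_memnorm; exact hpa1) (by v3_memnorm; exact hpost_toks) Iff.rfl)
          (by v3_regnorm; exact A2.r15_inc _)⟩
      | some ts1 =>
        -- tokens[toksuper].size++
        obtain ⟨htb0, hlen1, htoks1⟩ := hpost_toks
        have htinv1 := hinv1.toks ts1 rfl
        have hsuplo := htinv1.superLo
        have hsuphi := htinv1.superHi
        have hsmall := htinv1.small
        simp only [links_default, Bool.false_eq_true, if_false] at hsuphi
        obtain ⟨j, hj⟩ : ∃ j : Nat, p1.toksuper = j := ⟨p1.toksuper.toNat, by omega⟩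
        have hjlt : j < c.numTokens := by omega
        have hsupv : v1.mem.readLE (c.pa + 8) 4 = j := by rw [hsupraw, hj]; unfold u32; omega
        clear hsupraw
        have hsext := Word.sext32_ofNat_of_lt j (by omega)
        have hshl := shl4_ofNat j (by omega)
        have hlow := Word.low32_ofNat_of_lt (n := j) (by omega)
        have htbn : c.tb.toNat ≠ 0 := fun h => htb0 (UInt64.toNat_inj.mp h)
        obtain ⟨ts, hst⟩ : ∃ ts, s.toks = some ts := by
          cases hst : s.toks with
          | none => exact absurd (hnull1.mpr hst) (by simp)
          | some ts => exact ⟨ts, rfl⟩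
        have htb16 : toksBytes Config.default c.numTokens s.toks = 16 * c.numTokens := by rw [hst]; rfl
        rw [htb16] at htbeq hcore
        rw [← htbeq] at hW_hi hW_stk hW_img hp_env_parserToks hp_env_jsToks
        have hRlo := (hp.env.toksR.resolve_left htb0).lo
        clear hp_env_jsR_lo hp_env_jsR_hi hp_env_jsR_stk hp_env_jsR_img hp_env_parserJs hp_env_jsToks hp_call_retAddr hp_call_retlt hco_ntok
        v3_walk hcode1 hfetch [hsext, hshl, hlow, show ((233 : Nat) == 235) = false by decide, show ((233 : UInt8) == 235) = false by decide,
          show ((233 : UInt64) == 235) = false by decide] until [0x100462, 0x100529]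
        have hbs := A2.bumpSuper_some (ts := ts1) hj
        rw [hbs] at hbody ⊢
        exact Reach.done ⟨by simp, A2.frame_next (fuel := fuel) sf hfr hbody (hcore _ _ (by v3_regnorm) (by v3_regnorm) (by v3_regnorm) (by v3_regnorm)
          (by v3_regnorm) (by v3_same) (by v3_frame hpa1)
          ⟨htb0, by rw [A2.tokUpd_nat, List.length_set]; exact hlen1, by v3_memnorm; exact A2.bump_tokens htoks1 hlen1 hjlt (by v3_omega)⟩ (by simp))
          (by v3_regnorm; exact A2.r15_inc _)⟩

end FD
end J6
end X86
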